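-- pv_equiv track=rewrite | github.com/UCAS-LukeMurdock/Personal-Finance-Program | visual.py | add_values
-- ===== SOURCE A (Python) =====
-- def largest_value(lst):
--     value = 0
--     for i in lst:
--         if i >= value:
--             value = i
--
--     return value
--
-- def add_values(x, y):
--     #variables
--     new_x = []
--     new_y = []
--     next_x = 100
--     next_y = 0
--
--     #loop through all numbers and make a list
--     while next_x <= largest_value(x):
--         if next_x in x:
--             new_x.append(next_x)
--             next_y = 0
--             for index, value in enumerate(x):
--                 if value == next_x:
--                     next_y += y[index]
--
--             new_y.append(next_y)
--
--
--         next_x += 1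
--
--     return new_x, new_y
-- ===== SOURCE B (Python) =====
-- def add_values(x, y):
--     sums = {}
--     for xi, yi in zip(x, y):
--         if xi >= 100:
--             sums[xi] = sums.get(xi, 0) + yi
--     keys = sorted(sums)
--     return keys, [sums[k] for k in keys]
-- ===== Notes on version B (the rewrite author's own statement) =====
-- stated objective: faster
-- what changed: Replaces the scan of every integer from 100 to max(x) (each with an inner membership test and a full enumerate pass) by a single pass over zip(x,y) accumulating sums in a dict, then emitting the sorted dict keys.
import Mathlib
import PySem

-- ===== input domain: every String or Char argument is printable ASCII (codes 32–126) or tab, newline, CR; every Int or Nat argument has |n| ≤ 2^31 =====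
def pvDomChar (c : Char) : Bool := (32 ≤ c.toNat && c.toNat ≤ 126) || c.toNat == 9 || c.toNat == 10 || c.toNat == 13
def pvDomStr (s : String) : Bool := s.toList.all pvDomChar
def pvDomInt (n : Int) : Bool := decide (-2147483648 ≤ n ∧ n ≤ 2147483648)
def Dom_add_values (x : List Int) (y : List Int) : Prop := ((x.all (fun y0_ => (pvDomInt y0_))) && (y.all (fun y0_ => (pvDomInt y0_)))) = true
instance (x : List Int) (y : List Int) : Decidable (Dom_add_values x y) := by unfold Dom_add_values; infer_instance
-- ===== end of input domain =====

-- B replaces A's scan of every integer in [100, max(x)] by one dict-summing pass over zip(x,y)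
-- plus a key sort (measured faster; return-value equivalence proved on Pre_).

-- ===== PORT A =====
def pvLargestValue (lst : List Int) : Int :=
  lst.foldl (fun value i => if i ≥ value then i else value) 0

-- y[index] is ported as pyGetD y index 0; on Pre_ every index reached is in range, where this is exact
def pvAddLoop (x : List Int) (y : List Int) (next_x : Int) (new_x : List Int) (new_y : List Int) :
    List Int × List Int :=
  if _h : next_x ≤ pvLargestValue x then
    if x.contains next_x then
      let next_y := (PySem.List.enumerate x 0).foldl
        (fun s p => if p.2 = next_x then s + PySem.List.pyGetD y p.1 0 else s) 0
      pvAddLoop x y (next_x + 1) (new_x ++ [next_x]) (new_y ++ [next_y])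
    else
      pvAddLoop x y (next_x + 1) new_x new_y
  else (new_x, new_y)
termination_by (pvLargestValue x + 1 - next_x).toNat
decreasing_by all_goals omega

def add_values (x : List Int) (y : List Int) : List Int × List Int :=
  pvAddLoop x y 100 [] []

-- ===== PORT B =====
def add_values_alt (x : List Int) (y : List Int) : List Int × List Int :=
  let sums := (x.zip y).foldl
    (fun d p => if p.1 ≥ 100 then d.insert p.1 (d.getD p.1 0 + p.2) else d)
    (PySem.Dict.empty (κ := Int) (ν := Int))
  let keys := PySem.List.sorted sums.keys (fun k => k) false
  -- sums[k]: every k in keys is a key of sums, where getD is exact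
  (keys, keys.map (fun k => sums.getD k 0))

-- ===== PRECONDITION & SPEC =====
-- Pre_ excludes exactly the inputs on which A raises IndexError: some x[i] ≥ 100 with i ≥ len(y).
def Pre_add_values (x : List Int) (y : List Int) : Prop :=
  ∀ i, (h : i < x.length) → 100 ≤ x[i] → i < y.length
instance (x : List Int) (y : List Int) : Decidable (Pre_add_values x y) := by
  unfold Pre_add_values; infer_instance

def pvWitness_add_values : List Int × List Int := ([100, 3, 105, 100], [1, 2, 3, 4])

def Spec_add_values (x : List Int) (y : List Int) (out : List Int × List Int) : Prop := out = add_values_alt x y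
instance (x : List Int) (y : List Int) (out : List Int × List Int) : Decidable (Spec_add_values x y out) := by unfold Spec_add_values; infer_instance

-- ===== CLAIM (what is proved, stated in full; the proofs are below) =====
def Claim_equal_add_values : Prop := ∀ (x : List Int) (y : List Int), Dom_add_values x y → Pre_add_values x y → Spec_add_values x y (add_values x y)

-- ===== LEMMAS AND PROOFS =====

-- abbreviations used only by the proofs
def pvSumAt (x y : List Int) (u : Int) : Int :=
  (PySem.List.enumerate x 0).foldl (fun s p => if p.2 = u then s + PySem.List.pyGetD y p.1 0 else s) 0

def pvKeyList (x : List Int) : List Int :=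
  (PySem.List.pyRange 100 (pvLargestValue x + 1) 1).filter (fun u => x.contains u)

def pvZipF (x y : List Int) : List (Int × Int) :=
  (x.zip y).filter (fun p => decide (100 ≤ p.1))

-- every element of x is bounded by pvLargestValue x
theorem pv_le_foldl (x : List Int) (a : Int) :
    a ≤ x.foldl (fun value i => if i ≥ value then i else value) a ∧
    ∀ u ∈ x, u ≤ x.foldl (fun value i => if i ≥ value then i else value) a := by
  induction x generalizing a with
  | nil => simp
  | cons h t ih =>
    have h1 := ih (if h ≥ a then h else a)
    constructor
    · refine le_trans ?_ h1.1
      split <;> omega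
    · intro u hu
      rcases List.mem_cons.mp hu with rfl | hu
      · refine le_trans ?_ h1.1; split <;> omega
      · exact h1.2 u hu

theorem pv_mem_le_largest {x : List Int} {u : Int} (hu : u ∈ x) : u ≤ pvLargestValue x :=
  (pv_le_foldl x 0).2 u hu

-- characterisation of A's while loop
theorem pvAddLoop_spec (x y : List Int) (v : Int) (nx ny : List Int) :
    pvAddLoop x y v nx ny =
      (nx ++ (PySem.List.pyRange v (pvLargestValue x + 1) 1).filter (fun u => x.contains u),
       ny ++ ((PySem.List.pyRange v (pvLargestValue x + 1) 1).filter (fun u => x.contains u)).map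
          (pvSumAt x y)) := by
  induction v, nx, ny using pvAddLoop.induct x y with
  | case1 v nx ny h hc ny' ih =>
    rw [pvAddLoop]
    simp only [h, dif_pos, if_pos hc]
    simp only [ny', dite_eq_ite] at ih
    rw [ih, PySem.List.pyRange_one_cons (a := v) (b := pvLargestValue x + 1) (by omega)]
    have hc' : v ∈ x := by simpa using hc
    simp [hc', pvSumAt]
  | case2 v nx ny h hc ih =>
    rw [pvAddLoop]
    simp only [h, dif_pos, if_neg hc]
    rw [ih, PySem.List.pyRange_one_cons (a := v) (b := pvLargestValue x + 1) (by omega)]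
    have hc' : v ∉ x := by simpa using hc
    simp [hc']
  | case3 v nx ny h =>
    rw [pvAddLoop]
    simp only [h, dif_neg, not_false_iff]
    rw [PySem.List.pyRange_one_eq_nil (by omega)]
    simp

-- generic sum invariant for B's dict-summing fold
theorem pv_getD_foldl_insert_add (l : List (Int × Int)) (d : PySem.Dict Int Int) (v : Int) :
    (l.foldl (fun d p => d.insert p.1 (d.getD p.1 0 + p.2)) d).getD v 0
      = d.getD v 0 + ((l.filter (fun p => p.1 == v)).map (·.2)).sum := by
  induction l generalizing d with
  | nil => simp
  | cons p l ih =>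
    rw [List.foldl_cons, ih]
    by_cases h : p.1 = v
    · simp [h, add_assoc]
    · simp [PySem.Dict.getD_insert, h, Ne.symm h]


-- zip as an index comprehension
theorem pv_zip_eq_map_pyRange (x y : List Int) :
    x.zip y = (PySem.List.pyRange 0 (min x.length y.length : Nat) 1).map
      (fun j => (PySem.List.pyGetD x j 0, PySem.List.pyGetD y j 0)) := by
  apply List.ext_getElem
  · simp only [List.length_map, PySem.List.length_pyRange_one, List.length_zip]
    omega
  · intro i h1 h2
    have hi : i < min x.length y.length := by
      simpa [PySem.List.length_pyRange_one] using h2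
    have hix : i < x.length := lt_of_lt_of_le hi (min_le_left _ _)
    have hiy : i < y.length := lt_of_lt_of_le hi (min_le_right _ _)
    simp only [List.getElem_map, List.getElem_zip, PySem.List.getElem_pyRange_one]
    rw [PySem.List.pyGetD_eq_getElem x 0 (by omega) (by omega),
        PySem.List.pyGetD_eq_getElem y 0 (by omega) (by omega)]
    simp

-- the two per-key sums agree on Pre_ for keys ≥ 100
theorem pv_sum_eq (x y : List Int) (hpre : Pre_add_values x y) (u : Int) (hu : 100 ≤ u) :
    pvSumAt x y u = (((pvZipF x y).filter (fun p => p.1 == u)).map (·.2)).sum := by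
  unfold pvSumAt pvZipF
  rw [PySem.List.enumerate_eq_map_pyRange x 0, List.foldl_map]
  rw [show (fun (s : Int) (j : Int) =>
        if ((j, PySem.List.pyGetD x j 0) : Int × Int).2 = u then
          s + PySem.List.pyGetD y ((j, PySem.List.pyGetD x j 0) : Int × Int).1 0 else s)
      = (fun s j => if PySem.List.pyGetD x j 0 = u then s + PySem.List.pyGetD y j 0 else s) from rfl]
  rw [PySem.List.foldl_ite_eq_foldl_filter (fun j => PySem.List.pyGetD x j 0 = u)
        (fun s j => s + PySem.List.pyGetD y j 0)]
  rw [PySem.List.foldl_add]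
  rw [pv_zip_eq_map_pyRange x y]
  simp only [List.filter_map, List.map_map, List.filter_filter, Function.comp_def]
  have hsplit : PySem.List.pyRange 0 (PySem.List.len x) 1
      = PySem.List.pyRange 0 ((min x.length y.length : Nat) : Int) 1
        ++ PySem.List.pyRange ((min x.length y.length : Nat) : Int) (PySem.List.len x) 1 := by
    apply PySem.List.pyRange_one_append
    · positivity
    · simp only [PySem.List.len]
      omega
  rw [hsplit, List.filter_append, List.map_append, List.sum_append]
  have htail : (PySem.List.pyRange ((min x.length y.length : Nat) : Int) (PySem.List.len x) 1).filter
      (fun j => decide (PySem.List.pyGetD x j 0 = u)) = [] := by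
    rw [List.filter_eq_nil_iff]
    intro j hj
    have hj' := PySem.List.mem_pyRange_one.mp hj
    simp only [PySem.List.len] at hj'
    have h0j : 0 ≤ j := le_trans (by positivity) hj'.1
    rw [PySem.List.pyGetD_eq_getElem x 0 h0j (by omega)]
    simp only [decide_eq_true_eq]
    intro hxe
    have := hpre j.toNat (by omega) (by rw [hxe]; exact hu)
    omega
  rw [htail]
  simp only [List.map_nil, List.sum_nil, add_zero, zero_add]
  have hcong : (PySem.List.pyRange 0 ((min x.length y.length : Nat) : Int) 1).filter
        (fun j => decide (PySem.List.pyGetD x j 0 = u))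
      = (PySem.List.pyRange 0 ((min x.length y.length : Nat) : Int) 1).filter
        (fun j => (PySem.List.pyGetD x j 0 == u) && decide (100 ≤ PySem.List.pyGetD x j 0)) := by
    apply List.filter_congr
    intro j _hj
    by_cases h : PySem.List.pyGetD x j 0 = u
    · simp [h, hu]
    · simp [h]
  rw [hcong]

-- membership in B's key pool
theorem pv_mem_zipF (x y : List Int) (hpre : Pre_add_values x y) (u : Int) :
    u ∈ (pvZipF x y).map (·.1) ↔ 100 ≤ u ∧ u ∈ x := by
  unfold pvZipF
  constructor
  · intro h
    rcases List.mem_map.mp h with ⟨p, hp, rfl⟩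
    rcases List.mem_filter.mp hp with ⟨hpz, hp100⟩
    exact ⟨by simpa using hp100, (List.of_mem_zip hpz).1⟩
  · rintro ⟨hu, hux⟩
    rcases List.mem_iff_getElem.mp hux with ⟨i, hi, hxi⟩
    have hiy : i < y.length := hpre i hi (hxi ▸ hu)
    have hiz : i < (x.zip y).length := by simp [List.length_zip]; omega
    refine List.mem_map.mpr ⟨(x.zip y)[i], List.mem_filter.mpr ⟨List.getElem_mem hiz, ?_⟩, ?_⟩
    · simp [List.getElem_zip, hxi, hu]
    · simp [List.getElem_zip, hxi]

-- main equivalence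
theorem pv_main (x y : List Int) (hpre : Pre_add_values x y) :
    add_values x y = add_values_alt x y := by
  rw [add_values, pvAddLoop_spec]
  simp only [List.nil_append]
  simp only [add_values_alt]
  have hfold : (x.zip y).foldl
      (fun d p => if p.1 ≥ 100 then d.insert p.1 (d.getD p.1 0 + p.2) else d)
      (PySem.Dict.empty (κ := Int) (ν := Int))
      = (pvZipF x y).foldl (fun d p => d.insert p.1 (d.getD p.1 0 + p.2)) PySem.Dict.empty := by
    rw [PySem.List.foldl_ite_eq_foldl_filter (fun p : Int × Int => p.1 ≥ 100)
      (fun (d : PySem.Dict Int Int) (p : Int × Int) => d.insert p.1 (d.getD p.1 0 + p.2))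
      (x.zip y) PySem.Dict.empty]
    rfl
  rw [hfold]
  set S := (pvZipF x y).foldl (fun d p => d.insert p.1 (d.getD p.1 0 + p.2))
      (PySem.Dict.empty (κ := Int) (ν := Int)) with hS
  have hkeys : S.keys = PySem.Set.ofList ((pvZipF x y).map (·.1)) := by
    rw [hS, PySem.Dict.keys_foldl_insert_key (pvZipF x y) (fun p => p.1)
      (fun d p => d.getD p.1 0 + p.2) PySem.Dict.empty,
      PySem.Dict.keys_empty, PySem.Set.update_nil_left]
  have hmemF : ∀ u, u ∈ pvKeyList x ↔ u ∈ S.keys := by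
    intro u
    rw [hkeys, PySem.Set.mem_ofList, pv_mem_zipF x y hpre]
    unfold pvKeyList
    simp only [List.mem_filter, PySem.List.mem_pyRange_one, List.contains_eq_mem,
      decide_eq_true_eq]
    constructor
    · rintro ⟨⟨h1, _⟩, h3⟩; exact ⟨h1, h3⟩
    · rintro ⟨h1, h2⟩
      exact ⟨⟨h1, by have := pv_mem_le_largest h2; omega⟩, h2⟩
  have hnodupF : (pvKeyList x).Nodup := (PySem.List.nodup_pyRange_one _ _).filter _
  have hpwF : (pvKeyList x).Pairwise (· < ·) :=
    List.Pairwise.sublist List.filter_sublist (PySem.List.pairwise_lt_pyRange_one _ _)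
  have hnodupK : S.keys.Nodup := hkeys ▸ PySem.Set.nodup_ofList _
  have hperm : (pvKeyList x).Perm S.keys := (List.perm_ext_iff_of_nodup hnodupF hnodupK).mpr hmemF
  have hsorted : PySem.List.sorted S.keys (fun k => k) false = pvKeyList x :=
    PySem.List.sorted_eq_of_perm_of_pairwise_lt _ _ _ hperm hpwF
  rw [hsorted]
  unfold pvKeyList
  refine Prod.ext rfl ?_
  apply List.map_congr_left
  intro u huF
  have hu : 100 ≤ u := by
    have := (List.mem_filter.mp huF).1
    exact (PySem.List.mem_pyRange_one.mp this).1
  rw [pv_sum_eq x y hpre u hu, pv_getD_foldl_insert_add, PySem.Dict.getD_empty, zero_add]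

-- ===== VERDICT (by name: the statement is the Claim_ definition above) =====
theorem add_values_spec : Claim_equal_add_values := by
  intro x y _hdom hpre
  unfold Spec_add_values
  exact pv_main x y hpre
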